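-- pv_equiv track=rewrite | github.com/revathi38/DSA_learning | python/Arrays/Scaler/max_sub_matrix_sum.py | maxSubMatrixSum
-- ===== SOURCE A (Python) =====
-- def maxSubMatrixSum(matrix):
--     rows = len(matrix)
--     cols = len(matrix[0])
--
--     pfm_sum = [[0 for _ in range(cols)] for _ in range(rows)]
--
--     # prefix sum row wise
--     for i in range(rows):
--         pfm_sum[i][0] = matrix[i][0]
--         for j in range(1, cols):
--             pfm_sum[i][j] = pfm_sum[i][j-1] + matrix[i][j]
--
--     # prefix sum column wise
--     for j in range(cols):
--         for i in range(1, rows):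
--             pfm_sum[i][j] = pfm_sum[i-1][j] + pfm_sum[i][j]
--
--     max_submatrix_sum = float("-inf")
--     for r in range(rows):
--         for c in range(cols):
--             x1 = r
--             y1 = c
--
--             x2 = rows-1
--             y2 = cols-1
--
--             curr_sum = pfm_sum[x2][y2]
--
--             if y1 > 0:
--                 curr_sum -= pfm_sum[x2][y1-1]
--
--             if x1 > 0:
--                 curr_sum -= pfm_sum[x1-1][y2]
--
--             if x1 > 0 and y1 > 0:
--                 curr_sum += pfm_sum[x1-1][y1-1]
--
--
--             max_submatrix_sum = max(max_submatrix_sum, curr_sum)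
--
--
--     return max_submatrix_sum
-- ===== SOURCE B (Python) =====
-- def maxSubMatrixSum(matrix):
--     cols = len(matrix[0])
--     below = [0] * (cols + 1)
--     best = float("-inf")
--     for row in reversed(matrix):
--         cur = [0] * (cols + 1)
--         for j in range(cols - 1, -1, -1):
--             cur[j] = row[j] + below[j] + cur[j + 1] - below[j + 1]
--         best = max(best, max(cur[:cols]))
--         below = cur
--     return best
-- ===== Notes on version B (the rewrite author's own statement) =====
-- stated objective: faster
-- what changed: Replaces A's two separate prefix-sum build passes plus a conditional inclusion-exclusion query loop with a single fused bottom-up pass that keeps only one suffix-sum row (O(cols) extra space instead of O(rows*cols)) and takes each row's maximum as it goes.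
import Mathlib
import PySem

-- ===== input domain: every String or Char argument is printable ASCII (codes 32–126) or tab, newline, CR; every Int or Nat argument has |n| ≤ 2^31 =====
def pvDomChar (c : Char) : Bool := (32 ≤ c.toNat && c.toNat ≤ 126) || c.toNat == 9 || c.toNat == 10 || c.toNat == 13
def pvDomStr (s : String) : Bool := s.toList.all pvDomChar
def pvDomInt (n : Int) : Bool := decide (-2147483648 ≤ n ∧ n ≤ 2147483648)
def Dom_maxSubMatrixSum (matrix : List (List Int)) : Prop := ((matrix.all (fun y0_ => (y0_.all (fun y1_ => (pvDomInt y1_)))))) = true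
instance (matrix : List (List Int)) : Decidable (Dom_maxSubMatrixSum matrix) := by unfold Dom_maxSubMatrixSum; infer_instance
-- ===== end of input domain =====

-- B replaces A's two prefix-sum passes + conditional query loop by one fused bottom-up pass over a single suffix-sum row (different decomposition, O(cols) extra space); return values proved equal on Pre_.

-- ===== PORT A =====
-- matrix element access matrix[i][j] (always in range where A reads it, under Pre_)
def pvM (matrix : List (List Int)) (i j : Nat) : Int := (matrix.getD i []).getD j 0
-- pfm_sum[i][j] read / write on the list-of-lists table
def pvGet2 (t : List (List Int)) (i j : Nat) : Int := (t.getD i []).getD j 0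
def pvSet2 (t : List (List Int)) (i j : Nat) (v : Int) : List (List Int) :=
  t.set i ((t.getD i []).set j v)
-- max_submatrix_sum accumulator: none = float("-inf"), Python max(b, x)
def pvOptMax (b : Option Int) (x : Int) : Option Int :=
  some (match b with | none => x | some v => max v x)
-- "# prefix sum row wise" loop of A (table starts as [[0]*cols for _ in range(rows)])
def pvRowPass (m : Nat → Nat → Int) (rows cols : Nat) : List (List Int) :=
  (List.range rows).foldl (fun t i =>
    (List.range' 1 (cols - 1)).foldl (fun t j => pvSet2 t i j (pvGet2 t i (j - 1) + m i j))
      (pvSet2 t i 0 (m i 0))) (List.replicate rows (List.replicate cols 0))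
-- "# prefix sum column wise" loop of A
def pvColPass (t0 : List (List Int)) (rows cols : Nat) : List (List Int) :=
  (List.range cols).foldl (fun t j =>
    (List.range' 1 (rows - 1)).foldl (fun t i => pvSet2 t i j (pvGet2 t (i - 1) j + pvGet2 t i j)) t) t0
-- the curr_sum computation for one (r, c), branches in A's order
def pvQuery (pfm : List (List Int)) (rows cols r c : Nat) : Int :=
  let c0 := pvGet2 pfm (rows - 1) (cols - 1)
  let c1 := if 0 < c then c0 - pvGet2 pfm (rows - 1) (c - 1) else c0
  let c2 := if 0 < r then c1 - pvGet2 pfm (r - 1) (cols - 1) else c1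
  if 0 < r ∧ 0 < c then c2 + pvGet2 pfm (r - 1) (c - 1) else c2

def maxSubMatrixSum (matrix : List (List Int)) : Int :=
  let rows := matrix.length
  let cols := (matrix.headD []).length
  let pfm := pvColPass (pvRowPass (pvM matrix) rows cols) rows cols
  let best := (List.range rows).foldl (fun b r =>
      (List.range cols).foldl (fun b c => pvOptMax b (pvQuery pfm rows cols r c)) b)
    (none : Option Int)
  best.getD 0   -- under Pre_ the loops run, so best is some value (Python never returns -inf there)

-- ===== PORT B =====
-- inner loop of B: cur[j] = row[j] + below[j] + cur[j+1] - below[j+1], built right to left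
def pvSufRow : List Int → List Int → List Int
  | [], _ => [0]
  | _ :: _, [] => [0]   -- unreachable: below always has length row.length + 1
  | v :: rest, b :: bs =>
      let tail := pvSufRow rest bs
      (v + b + tail.headD 0 - bs.headD 0) :: tail
-- Python max(nonempty list); [] unreachable under Pre_
def pvListMax : List Int → Int
  | [] => 0
  | x :: xs => xs.foldl max x

def maxSubMatrixSum_alt (matrix : List (List Int)) : Int :=
  let cols := (matrix.headD []).length
  let res := matrix.foldr (fun row st =>
      let cur := pvSufRow (row.take cols) st.1
      (cur, pvOptMax st.2 (pvListMax (cur.take cols)))) (List.replicate (cols + 1) 0, (none : Option Int))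
  res.2.getD 0

-- ===== PRECONDITION & SPEC =====
-- Pre_: exactly the inputs where Python A returns normally: a nonempty matrix whose first row is
-- nonempty and every row has at least len(matrix[0]) entries (otherwise matrix[0] / matrix[i][j]
-- raises IndexError).
def Pre_maxSubMatrixSum (matrix : List (List Int)) : Prop :=
  matrix ≠ [] ∧ 0 < (matrix.headD []).length ∧
    ∀ row ∈ matrix, (matrix.headD []).length ≤ row.length
instance (matrix : List (List Int)) : Decidable (Pre_maxSubMatrixSum matrix) := by
  unfold Pre_maxSubMatrixSum; infer_instance
def pvWitness_maxSubMatrixSum : List (List Int) := [[1, -2], [-3, 4]]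
def Spec_maxSubMatrixSum (matrix : List (List Int)) (out : Int) : Prop := out = maxSubMatrixSum_alt matrix
instance (matrix : List (List Int)) (out : Int) : Decidable (Spec_maxSubMatrixSum matrix out) := by
  unfold Spec_maxSubMatrixSum; infer_instance

-- ===== CLAIM =====
def Claim_equal_maxSubMatrixSum : Prop := ∀ (matrix : List (List Int)), Dom_maxSubMatrixSum matrix → Pre_maxSubMatrixSum matrix → Spec_maxSubMatrixSum matrix (maxSubMatrixSum matrix)

-- ===== LEMMAS AND PROOFS =====

-- the mathematical submatrix sums both programs compute
def pvT (matrix : List (List Int)) (a b : Nat) : Int :=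
  ∑ i ∈ Finset.range a, ∑ j ∈ Finset.range b, pvM matrix i j
def pvS (matrix : List (List Int)) (cols r c : Nat) : Int :=
  ∑ i ∈ Finset.Ico r matrix.length, ∑ j ∈ Finset.Ico c cols, pvM matrix i j
-- "o is the maximum of the values satisfying P" (none = no values)
def pvIsMax (o : Option Int) (P : Int → Prop) : Prop :=
  match o with
  | none => ∀ x, ¬ P x
  | some v => P v ∧ ∀ x, P x → x ≤ v
-- row prefix sums matrix[i][0..j]
def pvRowpref (m : Nat → Nat → Int) (i j : Nat) : Int := ∑ k ∈ Finset.range (j + 1), m i k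

-- table shape: rows rows, each of length cols
def pvShape (t : List (List Int)) (rows cols : Nat) : Prop :=
  t.length = rows ∧ ∀ i, i < rows → (t.getD i []).length = cols

theorem pvGetD_rep {α : Type} (a d : α) (n j : Nat) :
    (List.replicate n a).getD j d = if j < n then a else d := by
  induction n generalizing j with
  | zero => simp
  | succ n ih =>
      cases j with
      | zero => simp
      | succ j' =>
          simp only [List.replicate_succ, List.getD_cons_succ, ih]
          by_cases h : j' < n
          · rw [if_pos h, if_pos (by omega)]
          · rw [if_neg h, if_neg (by omega)]

theorem pvShape_rep (rows cols : Nat) :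
    pvShape (List.replicate rows (List.replicate cols (0 : Int))) rows cols := by
  refine ⟨by simp, ?_⟩
  intro i hi
  rw [pvGetD_rep, if_pos hi, List.length_replicate]

theorem pvGet2_rep (rows cols i j : Nat) :
    pvGet2 (List.replicate rows (List.replicate cols (0 : Int))) i j = 0 := by
  unfold pvGet2
  rw [pvGetD_rep]
  by_cases h : i < rows
  · rw [if_pos h, pvGetD_rep]
    by_cases h2 : j < cols
    · rw [if_pos h2]
    · rw [if_neg h2]
  · rw [if_neg h]
    simp

theorem pvGetD_setO {α : Type} (l : List α) (i i' : Nat) (x : α) (d : α) (hi : i < l.length) :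
    (l.set i x).getD i' d = if i' = i then x else l.getD i' d := by
  rw [List.getD_eq_getElem?_getD, List.getD_eq_getElem?_getD, List.getElem?_set]
  by_cases h : i' = i
  · rw [if_pos h, if_pos h.symm, if_pos hi]
    rfl
  · rw [if_neg h, if_neg (fun hh => h hh.symm)]

theorem pvShape_set2 (t : List (List Int)) (rows cols i j : Nat) (v : Int)
    (hsh : pvShape t rows cols) (hi : i < rows) :
    pvShape (pvSet2 t i j v) rows cols := by
  obtain ⟨h1, h2⟩ := hsh
  refine ⟨by simp [pvSet2, h1], ?_⟩
  intro i' hi'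
  unfold pvSet2
  rw [pvGetD_setO _ _ _ _ _ (by omega)]
  by_cases h : i' = i
  · rw [if_pos h, List.length_set]
    exact h2 i hi
  · rw [if_neg h]
    exact h2 i' hi'

theorem pvGet2_set2 (t : List (List Int)) (rows cols i j : Nat) (v : Int)
    (hsh : pvShape t rows cols) (hi : i < rows) (hj : j < cols) (i' j' : Nat) :
    pvGet2 (pvSet2 t i j v) i' j' = if i' = i ∧ j' = j then v else pvGet2 t i' j' := by
  obtain ⟨h1, h2⟩ := hsh
  unfold pvGet2 pvSet2
  rw [pvGetD_setO _ _ _ _ _ (by omega)]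
  by_cases h : i' = i
  · rw [if_pos h, pvGetD_setO _ _ _ _ _ (by rw [h2 i hi]; omega)]
    by_cases h4 : j' = j
    · rw [if_pos h4, if_pos ⟨h, h4⟩]
    · rw [if_neg h4, if_neg (by tauto), h]
  · rw [if_neg h, if_neg (by tauto)]

-- inner loop of the row-wise pass
theorem pvRowInner (m : Nat → Nat → Int) (rows cols i : Nat) (hi : i < rows) :
    ∀ (n : Nat), n < cols → ∀ (t : List (List Int)), pvShape t rows cols →
      pvShape ((List.range' 1 n).foldl (fun t j => pvSet2 t i j (pvGet2 t i (j - 1) + m i j))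
        (pvSet2 t i 0 (m i 0))) rows cols ∧
      ∀ i' j', pvGet2 ((List.range' 1 n).foldl (fun t j => pvSet2 t i j (pvGet2 t i (j - 1) + m i j))
          (pvSet2 t i 0 (m i 0))) i' j'
        = if i' = i ∧ j' ≤ n then pvRowpref m i' j' else pvGet2 t i' j' := by
  intro n
  induction n with
  | zero =>
      intro hn t hsh
      simp only [List.range', List.foldl_nil]
      refine ⟨pvShape_set2 _ _ _ _ _ _ hsh hi, ?_⟩
      intro i' j'
      rw [pvGet2_set2 _ _ _ _ _ _ hsh hi (by omega)]
      by_cases h : i' = i ∧ j' = 0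
      · rw [if_pos h, if_pos (by omega : i' = i ∧ j' ≤ 0)]
        obtain ⟨h1, h2⟩ := h
        subst h1; subst h2
        simp [pvRowpref]
      · rw [if_neg h, if_neg (by omega : ¬ (i' = i ∧ j' ≤ 0))]
  | succ n ih =>
      intro hn t hsh
      have hr : List.range' 1 (n + 1) = List.range' 1 n ++ [1 + n] := by
        rw [List.range'_concat]; norm_num
      rw [hr, List.foldl_append]
      simp only [List.foldl_cons, List.foldl_nil]
      obtain ⟨ihs, ihv⟩ := ih (by omega) t hsh
      refine ⟨pvShape_set2 _ _ _ _ _ _ ihs hi, ?_⟩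
      intro i' j'
      rw [pvGet2_set2 _ _ _ _ _ _ ihs hi (by omega)]
      by_cases h : i' = i ∧ j' = 1 + n
      · obtain ⟨h1, h2⟩ := h; subst h1; subst h2
        rw [if_pos ⟨rfl, rfl⟩, ihv, if_pos (by omega : i' = i' ∧ 1 + n - 1 ≤ n),
            if_pos (by omega : i' = i' ∧ 1 + n ≤ n + 1)]
        have h3 : (1 + n - 1) = n := by omega
        have h4 : (1 + n) = n + 1 := by omega
        rw [h3, h4]
        simp [pvRowpref, Finset.sum_range_succ]
      · rw [if_neg h, ihv]
        by_cases h2 : i' = i ∧ j' ≤ n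
        · rw [if_pos h2, if_pos (by omega : i' = i ∧ j' ≤ n + 1)]
        · rw [if_neg h2, if_neg (by omega : ¬ (i' = i ∧ j' ≤ n + 1))]

-- the row-wise pass fills each row with its prefix sums
theorem pvRowPass_eq (m : Nat → Nat → Int) (rows cols : Nat) (hc : 0 < cols) :
    pvShape (pvRowPass m rows cols) rows cols ∧
    ∀ (i j : Nat),
      pvGet2 (pvRowPass m rows cols) i j = if i < rows ∧ j < cols then pvRowpref m i j else 0 := by
  unfold pvRowPass
  have aux : ∀ k, k ≤ rows →
      pvShape ((List.range k).foldl (fun t i =>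
        (List.range' 1 (cols - 1)).foldl (fun t j => pvSet2 t i j (pvGet2 t i (j - 1) + m i j))
          (pvSet2 t i 0 (m i 0))) (List.replicate rows (List.replicate cols 0))) rows cols ∧
      ∀ i j, pvGet2 ((List.range k).foldl (fun t i =>
        (List.range' 1 (cols - 1)).foldl (fun t j => pvSet2 t i j (pvGet2 t i (j - 1) + m i j))
          (pvSet2 t i 0 (m i 0))) (List.replicate rows (List.replicate cols 0))) i j
        = if i < k ∧ j < cols then pvRowpref m i j else 0 := by
    intro k
    induction k with
    | zero =>
        intro _
        refine ⟨pvShape_rep rows cols, ?_⟩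
        intro i j
        simp only [List.range_zero, List.foldl_nil]
        rw [pvGet2_rep, if_neg (by omega : ¬ (i < 0 ∧ j < cols))]
    | succ k ih =>
        intro hk
        obtain ⟨ihs, ihv⟩ := ih (by omega)
        rw [List.range_succ, List.foldl_append]
        simp only [List.foldl_cons, List.foldl_nil]
        obtain ⟨hs, hv⟩ := pvRowInner m rows cols k (by omega) (cols - 1) (by omega) _ ihs
        refine ⟨hs, ?_⟩
        intro i j
        rw [hv]
        by_cases h : i = k ∧ j ≤ cols - 1
        · rw [if_pos h, if_pos (by omega : i < k + 1 ∧ j < cols)]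
        · rw [if_neg h, ihv]
          by_cases h2 : i < k ∧ j < cols
          · rw [if_pos h2, if_pos (by omega : i < k + 1 ∧ j < cols)]
          · rw [if_neg h2, if_neg (by omega : ¬ (i < k + 1 ∧ j < cols))]
  exact aux rows le_rfl

-- inner loop of the column-wise pass: accumulates column j top-down
theorem pvColInner (rows cols j : Nat) (hj : j < cols) :
    ∀ (n : Nat), n < rows → ∀ (t : List (List Int)), pvShape t rows cols →
      pvShape ((List.range' 1 n).foldl
        (fun t i => pvSet2 t i j (pvGet2 t (i - 1) j + pvGet2 t i j)) t) rows cols ∧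
      ∀ i' j', pvGet2 ((List.range' 1 n).foldl
          (fun t i => pvSet2 t i j (pvGet2 t (i - 1) j + pvGet2 t i j)) t) i' j'
        = if j' = j ∧ i' ≤ n then ∑ k ∈ Finset.range (i' + 1), pvGet2 t k j
          else pvGet2 t i' j' := by
  intro n
  induction n with
  | zero =>
      intro hn t hsh
      simp only [List.range', List.foldl_nil]
      refine ⟨hsh, ?_⟩
      intro i' j'
      by_cases h : j' = j ∧ i' ≤ 0
      · rw [if_pos h]
        obtain ⟨h1, h2⟩ := h
        have h3 : i' = 0 := by omega
        subst h1; subst h3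
        simp
      · rw [if_neg h]
  | succ n ih =>
      intro hn t hsh
      have hr : List.range' 1 (n + 1) = List.range' 1 n ++ [1 + n] := by
        rw [List.range'_concat]; norm_num
      rw [hr, List.foldl_append]
      simp only [List.foldl_cons, List.foldl_nil]
      obtain ⟨ihs, ihv⟩ := ih (by omega) t hsh
      refine ⟨pvShape_set2 _ _ _ _ _ _ ihs (by omega), ?_⟩
      intro i' j'
      rw [pvGet2_set2 _ _ _ _ _ _ ihs (by omega) hj]
      by_cases h : i' = 1 + n ∧ j' = j
      · obtain ⟨h1, h2⟩ := h; subst h1; subst h2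
        rw [if_pos ⟨rfl, rfl⟩, ihv, ihv,
            if_pos (by omega : j' = j' ∧ 1 + n - 1 ≤ n),
            if_neg (by omega : ¬ (j' = j' ∧ 1 + n ≤ n)),
            if_pos (by omega : j' = j' ∧ 1 + n ≤ n + 1)]
        have h3 : (1 + n - 1) = n := by omega
        rw [h3]
        simp only [Nat.add_comm 1 n]
        linarith [Finset.sum_range_succ (fun k => pvGet2 t k j') (n + 1),
          Finset.sum_range_succ (fun k => pvGet2 t k j') n]
      · rw [if_neg h, ihv]
        by_cases h2 : j' = j ∧ i' ≤ n
        · rw [if_pos h2, if_pos (by omega : j' = j ∧ i' ≤ n + 1)]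
        · rw [if_neg h2, if_neg (by omega : ¬ (j' = j ∧ i' ≤ n + 1))]

-- the column-wise pass accumulates every processed column
theorem pvColPass_eq (t0 : List (List Int)) (rows cols : Nat) (hr : 0 < rows)
    (hsh : pvShape t0 rows cols) :
    ∀ (i j : Nat),
      pvGet2 (pvColPass t0 rows cols) i j
        = if j < cols ∧ i < rows then ∑ k ∈ Finset.range (i + 1), pvGet2 t0 k j
          else pvGet2 t0 i j := by
  unfold pvColPass
  have aux : ∀ k, k ≤ cols →
      pvShape ((List.range k).foldl (fun t j =>
        (List.range' 1 (rows - 1)).foldl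
          (fun t i => pvSet2 t i j (pvGet2 t (i - 1) j + pvGet2 t i j)) t) t0) rows cols ∧
      ∀ i j, pvGet2 ((List.range k).foldl (fun t j =>
        (List.range' 1 (rows - 1)).foldl
          (fun t i => pvSet2 t i j (pvGet2 t (i - 1) j + pvGet2 t i j)) t) t0) i j
        = if j < k ∧ i < rows then ∑ k ∈ Finset.range (i + 1), pvGet2 t0 k j
          else pvGet2 t0 i j := by
    intro k
    induction k with
    | zero =>
        intro _
        refine ⟨hsh, ?_⟩
        intro i j
        simp only [List.range_zero, List.foldl_nil]
        rw [if_neg (by omega : ¬ (j < 0 ∧ i < rows))]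
    | succ k ih =>
        intro hk
        obtain ⟨ihs, ihv⟩ := ih (by omega)
        rw [List.range_succ, List.foldl_append]
        simp only [List.foldl_cons, List.foldl_nil]
        obtain ⟨hs, hv⟩ := pvColInner rows cols k (by omega) (rows - 1) (by omega) _ ihs
        refine ⟨hs, ?_⟩
        intro i j
        rw [hv]
        by_cases h : j = k ∧ i ≤ rows - 1
        · rw [if_pos h, if_pos (by omega : j < k + 1 ∧ i < rows)]
          refine Finset.sum_congr rfl ?_
          intro x _
          rw [ihv, if_neg (by omega : ¬ (k < k ∧ x < rows)), h.1]
        · rw [if_neg h, ihv]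
          by_cases h2 : j < k ∧ i < rows
          · rw [if_pos h2, if_pos (by omega : j < k + 1 ∧ i < rows)]
          · rw [if_neg h2, if_neg (by omega : ¬ (j < k + 1 ∧ i < rows))]
  exact (aux cols le_rfl).2

theorem pvT_zero_left (matrix : List (List Int)) (b : Nat) : pvT matrix 0 b = 0 := by
  simp [pvT]

theorem pvT_zero_right (matrix : List (List Int)) (a : Nat) : pvT matrix a 0 = 0 := by
  simp [pvT]

-- inclusion–exclusion: the suffix-block sum via the four corner prefix sums
theorem pvS_split (matrix : List (List Int)) (cols r c : Nat)
    (hr : r ≤ matrix.length) (hc : c ≤ cols) :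
    pvS matrix cols r c
      = pvT matrix matrix.length cols - pvT matrix r cols
        - (pvT matrix matrix.length c - pvT matrix r c) := by
  unfold pvS pvT
  have inner : ∀ i : Nat, ∑ j ∈ Finset.Ico c cols, pvM matrix i j
      = ∑ j ∈ Finset.range cols, pvM matrix i j - ∑ j ∈ Finset.range c, pvM matrix i j :=
    fun i => Finset.sum_Ico_eq_sub _ hc
  rw [Finset.sum_congr rfl (fun i _ => inner i), Finset.sum_sub_distrib,
      Finset.sum_Ico_eq_sub _ hr, Finset.sum_Ico_eq_sub _ hr]

-- the pfm table A builds holds the 2D prefix sums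
theorem pvPfm_eq (matrix : List (List Int)) (rows cols : Nat)
    (hrows : rows = matrix.length) (hr : 0 < rows) (hc : 0 < cols)
    (i j : Nat) (hi : i < rows) (hj : j < cols) :
    pvGet2 (pvColPass (pvRowPass (pvM matrix) rows cols) rows cols) i j
      = pvT matrix (i + 1) (j + 1) := by
  rw [pvColPass_eq _ _ _ hr (pvRowPass_eq (pvM matrix) rows cols hc).1, if_pos ⟨hj, hi⟩]
  unfold pvT
  refine Finset.sum_congr rfl ?_
  intro k hk
  simp only [Finset.mem_range] at hk
  rw [(pvRowPass_eq (pvM matrix) rows cols hc).2, if_pos ⟨by omega, hj⟩]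
  rfl

-- the curr_sum A computes at (r, c) is the bottom-right block sum
theorem pvQuery_eq (matrix : List (List Int)) (rows cols r c : Nat)
    (hrows : rows = matrix.length) (hr0 : 0 < rows) (hc0 : 0 < cols)
    (hr : r < rows) (hc : c < cols) :
    pvQuery (pvColPass (pvRowPass (pvM matrix) rows cols) rows cols) rows cols r c
      = pvS matrix cols r c := by
  have corner : ∀ a b : Nat, a < rows → b < cols →
      pvGet2 (pvColPass (pvRowPass (pvM matrix) rows cols) rows cols) a b
        = pvT matrix (a + 1) (b + 1) :=
    fun a b ha hb => pvPfm_eq matrix rows cols hrows hr0 hc0 a b ha hb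
  have hsplit := pvS_split matrix cols r c (by omega) (by omega)
  simp only [pvQuery]
  rw [corner (rows - 1) (cols - 1) (by omega) (by omega)]
  have e1 : rows - 1 + 1 = rows := by omega
  have e2 : cols - 1 + 1 = cols := by omega
  rw [e1, e2]
  rw [← hrows] at hsplit
  by_cases hc1 : 0 < c
  · rw [if_pos hc1, corner (rows - 1) (c - 1) (by omega) (by omega), e1,
        (by omega : c - 1 + 1 = c)]
    by_cases hr1 : 0 < r
    · rw [if_pos hr1, corner (r - 1) (cols - 1) (by omega) (by omega), e2,
          (by omega : r - 1 + 1 = r), if_pos ⟨hr1, hc1⟩,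
          corner (r - 1) (c - 1) (by omega) (by omega),
          (by omega : r - 1 + 1 = r), (by omega : c - 1 + 1 = c)]
      rw [hsplit]; ring
    · have hr2 : r = 0 := by omega
      rw [if_neg hr1, if_neg (by omega : ¬ (0 < r ∧ 0 < c)), hsplit, hr2,
          pvT_zero_left, pvT_zero_left]
      ring
  · have hc2 : c = 0 := by omega
    rw [if_neg hc1, if_neg (by omega : ¬ (0 < r ∧ 0 < c))]
    by_cases hr1 : 0 < r
    · rw [if_pos hr1, corner (r - 1) (cols - 1) (by omega) (by omega), e2,
          (by omega : r - 1 + 1 = r), hsplit, hc2, pvT_zero_right, pvT_zero_right]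
      ring
    · have hr2 : r = 0 := by omega
      rw [if_neg hr1, hsplit, hr2, hc2, pvT_zero_left, pvT_zero_left, pvT_zero_right]
      ring

-- ===== max machinery =====
theorem pvIsMax_unique (o o' : Option Int) (P : Int → Prop)
    (h : pvIsMax o P) (h' : pvIsMax o' P) : o = o' := by
  cases o with
  | none =>
      cases o' with
      | none => rfl
      | some v => exact absurd h'.1 (h v)
  | some v =>
      cases o' with
      | none => exact absurd h.1 (h' v)
      | some w =>
          have := le_antisymm (h'.2 v h.1) (h.2 w h'.1)
          rw [this]

theorem pvIsMax_congr (o : Option Int) (P Q : Int → Prop)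
    (hpq : ∀ x, P x ↔ Q x) (h : pvIsMax o P) : pvIsMax o Q := by
  cases o with
  | none => exact fun x hx => h x ((hpq x).mpr hx)
  | some v => exact ⟨(hpq v).mp h.1, fun x hx => h.2 x ((hpq x).mpr hx)⟩

theorem pvIsMax_of (o : Option Int) (P Q : Int → Prop)
    (h : pvIsMax o P) (h1 : ∀ x, P x → Q x) (h2 : ∀ x, Q x → ∃ y, P y ∧ x ≤ y) :
    pvIsMax o Q := by
  cases o with
  | none =>
      intro x hx
      obtain ⟨y, hy, _⟩ := h2 x hx
      exact h y hy
  | some v =>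
      refine ⟨h1 v h.1, fun x hx => ?_⟩
      obtain ⟨y, hy, hxy⟩ := h2 x hx
      exact le_trans hxy (h.2 y hy)

theorem pvOptMax_isMax (b : Option Int) (x : Int) (P : Int → Prop)
    (h : pvIsMax b P) : pvIsMax (pvOptMax b x) (fun y => P y ∨ y = x) := by
  cases b with
  | none =>
      refine ⟨Or.inr rfl, fun y hy => ?_⟩
      rcases hy with hy | hy
      · exact absurd hy (h y)
      · exact hy.le
  | some v =>
      refine ⟨?_, fun y hy => ?_⟩
      · rcases le_total v x with hle | hle
        · exact Or.inr (by simp [max_eq_right hle])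
        · exact Or.inl (by simpa [max_eq_left hle] using h.1)
      · rcases hy with hy | hy
        · exact le_trans (h.2 y hy) (le_max_left _ _)
        · exact hy ▸ le_max_right _ _

-- folding pvOptMax over range n maximises q on range n
theorem pvFold_inner (q : Nat → Int) (n : Nat) :
    ∀ (b : Option Int) (P : Int → Prop), pvIsMax b P →
      pvIsMax ((List.range n).foldl (fun b c => pvOptMax b (q c)) b)
        (fun x => P x ∨ ∃ c < n, x = q c) := by
  induction n with
  | zero =>
      intro b P h
      simp only [List.range_zero, List.foldl_nil]
      refine pvIsMax_congr _ P _ ?_ h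
      intro x
      constructor
      · exact fun hx => Or.inl hx
      · rintro (hx | ⟨c, hc, _⟩)
        · exact hx
        · omega
  | succ n ih =>
      intro b P h
      rw [List.range_succ, List.foldl_append]
      simp only [List.foldl_cons, List.foldl_nil]
      have := pvOptMax_isMax _ (q n) _ (ih b P h)
      refine pvIsMax_congr _ _ _ ?_ this
      intro x
      constructor
      · rintro ((hx | ⟨c, hc, rfl⟩) | rfl)
        · exact Or.inl hx
        · exact Or.inr ⟨c, by omega, rfl⟩
        · exact Or.inr ⟨n, by omega, rfl⟩
      · rintro (hx | ⟨c, hc, rfl⟩)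
        · exact Or.inl (Or.inl hx)
        · by_cases hcn : c = n
          · subst hcn; exact Or.inr rfl
          · exact Or.inl (Or.inr ⟨c, by omega, rfl⟩)

theorem pvFold_outer (g : Nat → Nat → Int) (cols : Nat) (n : Nat) :
    pvIsMax ((List.range n).foldl (fun b r =>
        (List.range cols).foldl (fun b c => pvOptMax b (g r c)) b) (none : Option Int))
      (fun x => ∃ r < n, ∃ c < cols, x = g r c) := by
  induction n with
  | zero =>
      simp only [List.range_zero, List.foldl_nil]
      rintro x ⟨r, hr, _⟩; omega
  | succ n ih =>
      rw [List.range_succ, List.foldl_append]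
      simp only [List.foldl_cons, List.foldl_nil]
      have := pvFold_inner (g n) cols _ _ ih
      refine pvIsMax_congr _ _ _ ?_ this
      intro x
      constructor
      · rintro (⟨r, hr, c, hc, rfl⟩ | ⟨c, hc, rfl⟩)
        · exact ⟨r, by omega, c, hc, rfl⟩
        · exact ⟨n, by omega, c, hc, rfl⟩
      · rintro ⟨r, hr, c, hc, rfl⟩
        by_cases hrn : r = n
        · subst hrn; exact Or.inr ⟨c, hc, rfl⟩
        · exact Or.inl ⟨r, by omega, c, hc, rfl⟩

-- ===== B-side lemmas =====
theorem pvFoldlMax_spec (xs : List Int) : ∀ (x : Int),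
    xs.foldl max x ∈ x :: xs ∧ ∀ y ∈ x :: xs, y ≤ xs.foldl max x := by
  induction xs with
  | nil => intro x; simp
  | cons y ys ih =>
      intro x
      obtain ⟨hmem, hub⟩ := ih (max x y)
      constructor
      · simp only [List.foldl_cons]
        rcases List.mem_cons.mp hmem with hm | hm
        · rcases max_choice x y with hxy | hxy <;> rw [hxy] at hm ⊢ <;> simp [hm]
        · simp [hm]
      · intro z hz
        simp only [List.foldl_cons]
        rcases List.mem_cons.mp hz with rfl | hz2
        · exact le_trans (le_max_left z y) (hub _ (by simp))
        · rcases List.mem_cons.mp hz2 with rfl | hz3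
          · exact le_trans (le_max_right x z) (hub _ (by simp))
          · exact hub z (by simp [hz3])

theorem pvListMax_spec (l : List Int) (hl : l ≠ []) :
    pvListMax l ∈ l ∧ ∀ x ∈ l, x ≤ pvListMax l := by
  match l, hl with
  | x :: xs, _ => simpa [pvListMax] using pvFoldlMax_spec xs x

theorem pvSufRow_length (vals below : List Int) (h : below.length = vals.length + 1) :
    (pvSufRow vals below).length = vals.length + 1 := by
  induction vals generalizing below with
  | nil => simp [pvSufRow]
  | cons v rest ih =>
      match below, h with
      | b :: bs, h =>
        simp only [pvSufRow, List.length_cons]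
        rw [ih bs (by simpa using h)]

-- each entry of the new suffix row: the row's tail sum plus the entry below
theorem pvSufRow_getD (vals : List Int) :
    ∀ (below : List Int), below.length = vals.length + 1 →
      below.getD vals.length 0 = 0 →
      ∀ j, (pvSufRow vals below).getD j 0 = (vals.drop j).sum + below.getD j 0 := by
  induction vals with
  | nil =>
      intro below hlen hlast j
      match below, hlen with
      | [b], _ =>
        simp only [List.getD, List.length_nil] at hlast ⊢
        cases j with
        | zero => simp [pvSufRow]; exact hlast.symm
        | succ n => simp [pvSufRow]
  | cons v rest ih =>
      intro below hlen hlast j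
      match below, hlen with
      | b :: bs, hlen =>
        have hlen' : bs.length = rest.length + 1 := by simpa using hlen
        have hlast' : bs.getD rest.length 0 = 0 := by
          simpa [List.getD_cons_succ] using hlast
        cases j with
        | zero =>
            simp only [pvSufRow, List.getD_cons_zero, List.drop_zero, List.sum_cons]
            have h0 := ih bs hlen' hlast' 0
            have hhead : (pvSufRow rest bs).headD 0 = (pvSufRow rest bs).getD 0 0 := by
              cases pvSufRow rest bs <;> simp
            have hbs : bs.headD 0 = bs.getD 0 0 := by cases bs <;> simp
            rw [hhead, hbs, h0]
            simp only [List.drop_zero]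
            ring
        | succ n =>
            simp only [pvSufRow, List.getD_cons_succ, List.drop_succ_cons]
            exact ih bs hlen' hlast' n

-- sum of a take/drop window as a Finset.Ico sum of getD
theorem pvSum_take_drop (l : List Int) :
    ∀ (cs j : Nat), cs ≤ l.length →
      ((l.take cs).drop j).sum = ∑ k ∈ Finset.Ico j cs, l.getD k 0 := by
  induction l with
  | nil =>
      intro cs j h
      have : cs = 0 := by simpa using h
      subst this
      simp
  | cons a tl ih =>
      intro cs j h
      cases cs with
      | zero => simp
      | succ cs' =>
          have h' : cs' ≤ tl.length := by simpa using h
          cases j with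
          | zero =>
              simp only [List.take_succ_cons, List.drop_zero, List.sum_cons]
              have hih := ih cs' 0 h'
              simp only [List.drop_zero] at hih
              rw [hih]
              rw [Finset.sum_Ico_eq_sum_range, Finset.sum_Ico_eq_sum_range]
              simp only [Nat.sub_zero, Nat.zero_add]
              rw [Finset.sum_range_succ' (fun k => (a :: tl).getD k 0) cs']
              simp
              ring
          | succ j' =>
              simp only [List.take_succ_cons, List.drop_succ_cons]
              rw [ih cs' j' h']
              rw [Finset.sum_Ico_eq_sum_range, Finset.sum_Ico_eq_sum_range]
              have : cs' - j' = cs' + 1 - (j' + 1) := by omega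
              rw [← this]
              refine Finset.sum_congr rfl ?_
              intro k _
              have : j' + 1 + k = (j' + k) + 1 := by omega
              rw [this, List.getD_cons_succ]

-- suffix-block sums: shift and peel lemmas
theorem pvM_cons_succ (row : List Int) (rest : List (List Int)) (i j : Nat) :
    pvM (row :: rest) (i + 1) j = pvM rest i j := by
  simp [pvM]

theorem pvS_cons_succ (row : List Int) (rest : List (List Int)) (cols r c : Nat) :
    pvS (row :: rest) cols (r + 1) c = pvS rest cols r c := by
  unfold pvS
  rw [Finset.sum_Ico_eq_sum_range, Finset.sum_Ico_eq_sum_range]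
  simp only [List.length_cons]
  have : rest.length + 1 - (r + 1) = rest.length - r := by omega
  rw [this]
  refine Finset.sum_congr rfl ?_
  intro k _
  have : r + 1 + k = (r + k) + 1 := by omega
  rw [this]
  refine Finset.sum_congr rfl ?_
  intro j _
  exact pvM_cons_succ row rest (r + k) j

theorem pvS_cons_zero (row : List Int) (rest : List (List Int)) (cols c : Nat) :
    pvS (row :: rest) cols 0 c = (∑ j ∈ Finset.Ico c cols, row.getD j 0) + pvS rest cols 0 c := by
  unfold pvS
  simp only [List.length_cons]
  rw [Finset.sum_eq_sum_Ico_succ_bot (by omega : 0 < rest.length + 1)]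
  have h1 : ∑ j ∈ Finset.Ico c cols, pvM (row :: rest) 0 j = ∑ j ∈ Finset.Ico c cols, row.getD j 0 := by
    refine Finset.sum_congr rfl ?_
    intro j _
    simp [pvM]
  rw [h1]
  congr 1
  have := pvS_cons_succ row rest cols 0 c
  unfold pvS at this
  simpa using this

theorem pvS_nil (cols c : Nat) : pvS [] cols 0 c = 0 := by
  simp [pvS]

theorem pvS_self (mat : List (List Int)) (cols : Nat) : pvS mat cols 0 cols = 0 := by
  unfold pvS
  simp

theorem pvGetD_replicate (n j : Nat) : (List.replicate n (0 : Int)).getD j 0 = 0 := by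
  induction n generalizing j with
  | zero => simp
  | succ n ih =>
      cases j with
      | zero => simp
      | succ j' => simp only [List.replicate_succ, List.getD_cons_succ]; exact ih j'

theorem pvMem_take_getD (l : List Int) (n : Nat) (h : n ≤ l.length) (x : Int) :
    x ∈ l.take n ↔ ∃ c < n, x = l.getD c 0 := by
  rw [List.mem_iff_getElem]
  constructor
  · rintro ⟨i, hi, hx⟩
    have hi' : i < n := by simp at hi; omega
    refine ⟨i, hi', ?_⟩
    rw [List.getD_eq_getElem l 0 (by omega), ← hx, List.getElem_take]
  · rintro ⟨c, hc, rfl⟩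
    refine ⟨c, by simpa using (by omega : c < n ∧ c < l.length), ?_⟩
    rw [List.getD_eq_getElem l 0 (by omega), List.getElem_take]

-- B's loop body and fold, named for the proofs
def pvBStep (cols : Nat) (row : List Int) (st : List Int × Option Int) : List Int × Option Int :=
  let cur := pvSufRow (row.take cols) st.1
  (cur, pvOptMax st.2 (pvListMax (cur.take cols)))

def pvBFold (cols : Nat) (mat : List (List Int)) : List Int × Option Int :=
  mat.foldr (pvBStep cols) (List.replicate (cols + 1) 0, (none : Option Int))

-- invariant of B's single pass: the carried row is the suffix-block sums, the carried
-- maximum is the maximum over all blocks anchored in the processed rows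
theorem pvB_inv (cols : Nat) (hc : 0 < cols) :
    ∀ (mat : List (List Int)), (∀ row ∈ mat, cols ≤ row.length) →
      (pvBFold cols mat).1.length = cols + 1 ∧
      (∀ j, (pvBFold cols mat).1.getD j 0 = pvS mat cols 0 j) ∧
      pvIsMax (pvBFold cols mat).2
        (fun x => ∃ r < mat.length, ∃ c < cols, x = pvS mat cols r c) := by
  intro mat
  induction mat with
  | nil =>
      intro _
      refine ⟨by simp [pvBFold], ?_, ?_⟩
      · intro j
        rw [pvS_nil]
        simp only [pvBFold, List.foldr_nil]
        exact pvGetD_replicate (cols + 1) j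
      · rintro x ⟨r, hr, _⟩
        simp at hr
  | cons row rest ih =>
      intro hlenrows
      obtain ⟨ih1, ih2, ih3⟩ := ih (fun r hr => hlenrows r (List.mem_cons_of_mem _ hr))
      have hrowlen : cols ≤ row.length := hlenrows row List.mem_cons_self
      have hvals : (row.take cols).length = cols := by simp [hrowlen]
      have hfold : pvBFold cols (row :: rest) =
          (pvSufRow (row.take cols) (pvBFold cols rest).1,
           pvOptMax (pvBFold cols rest).2
             (pvListMax ((pvSufRow (row.take cols) (pvBFold cols rest).1).take cols))) := rfl
      set below := (pvBFold cols rest).1 with hbelow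
      set cur := pvSufRow (row.take cols) below with hcur
      have hlen : below.length = (row.take cols).length + 1 := by rw [hvals]; exact ih1
      have hlast : below.getD (row.take cols).length 0 = 0 := by
        rw [hvals, ih2 cols]; exact pvS_self rest cols
      have hcurlen : cur.length = cols + 1 := by
        rw [hcur, pvSufRow_length _ _ hlen, hvals]
      have hcurget : ∀ j, cur.getD j 0 = pvS (row :: rest) cols 0 j := by
        intro j
        rw [hcur, pvSufRow_getD _ _ hlen hlast j, pvSum_take_drop row cols j hrowlen,
            ih2 j, pvS_cons_zero]
      refine ⟨by rw [hfold]; exact hcurlen, by intro j; rw [hfold]; exact hcurget j, ?_⟩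
      rw [hfold]
      have hne : cur.take cols ≠ [] := by
        have h1 : (cur.take cols).length = cols := by simp [hcurlen]
        intro h0
        rw [h0] at h1
        simp at h1
        omega
      obtain ⟨hmem, hub⟩ := pvListMax_spec _ hne
      have hmemiff : ∀ x, x ∈ cur.take cols ↔ ∃ c < cols, x = cur.getD c 0 :=
        pvMem_take_getD cur cols (by omega)
      have base := pvOptMax_isMax _ (pvListMax (cur.take cols)) _ ih3
      refine pvIsMax_of _ _ _ base ?_ ?_
      · rintro x (⟨r, hr, c, hcc, rfl⟩ | rfl)
        · exact ⟨r + 1, by simp only [List.length_cons]; omega, c, hcc,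
            (pvS_cons_succ row rest cols r c).symm⟩
        · obtain ⟨c, hcc, hx⟩ := (hmemiff _).mp hmem
          exact ⟨0, by simp, c, hcc, by rw [hx, hcurget c]⟩
      · rintro x ⟨r, hr, c, hcc, rfl⟩
        cases r with
        | zero =>
            refine ⟨pvListMax (cur.take cols), Or.inr rfl, ?_⟩
            rw [← hcurget c]
            exact hub _ ((hmemiff _).mpr ⟨c, hcc, rfl⟩)
        | succ r' =>
            refine ⟨pvS rest cols r' c, Or.inl ⟨r', by simp only [List.length_cons] at hr; omega,
              c, hcc, rfl⟩, le_of_eq (pvS_cons_succ row rest cols r' c)⟩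

-- ===== VERDICT =====
theorem maxSubMatrixSum_spec : Claim_equal_maxSubMatrixSum := by
  intro matrix _ hpre
  obtain ⟨hne, hc0, hlens⟩ := hpre
  unfold Spec_maxSubMatrixSum
  have hrows : 0 < matrix.length := by
    cases matrix with
    | nil => exact absurd rfl hne
    | cons _ _ => simp
  have hA : maxSubMatrixSum matrix =
      ((List.range matrix.length).foldl (fun b r =>
          (List.range (matrix.headD []).length).foldl (fun b c =>
            pvOptMax b (pvQuery
              (pvColPass (pvRowPass (pvM matrix) matrix.length (matrix.headD []).length)
                matrix.length (matrix.headD []).length)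
              matrix.length (matrix.headD []).length r c)) b)
        (none : Option Int)).getD 0 := rfl
  have hB : maxSubMatrixSum_alt matrix
      = (pvBFold (matrix.headD []).length matrix).2.getD 0 := rfl
  have hAmax := pvFold_outer
    (pvQuery (pvColPass (pvRowPass (pvM matrix) matrix.length (matrix.headD []).length)
        matrix.length (matrix.headD []).length)
      matrix.length (matrix.headD []).length)
    (matrix.headD []).length matrix.length
  have hAmax' : pvIsMax ((List.range matrix.length).foldl (fun b r =>
          (List.range (matrix.headD []).length).foldl (fun b c =>
            pvOptMax b (pvQuery
              (pvColPass (pvRowPass (pvM matrix) matrix.length (matrix.headD []).length)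
                matrix.length (matrix.headD []).length)
              matrix.length (matrix.headD []).length r c)) b)
        (none : Option Int))
      (fun x => ∃ r < matrix.length, ∃ c < (matrix.headD []).length,
        x = pvS matrix (matrix.headD []).length r c) := by
    refine pvIsMax_congr _ _ _ ?_ hAmax
    intro x
    constructor
    · rintro ⟨r, hr, c, hcc, rfl⟩
      exact ⟨r, hr, c, hcc,
        (pvQuery_eq matrix matrix.length (matrix.headD []).length r c rfl hrows hc0 hr hcc)⟩
    · rintro ⟨r, hr, c, hcc, rfl⟩
      exact ⟨r, hr, c, hcc,
        (pvQuery_eq matrix matrix.length (matrix.headD []).length r c rfl hrows hc0 hr hcc).symm⟩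
  have hBmax := (pvB_inv (matrix.headD []).length hc0 matrix hlens).2.2
  rw [hA, hB, pvIsMax_unique _ _ _ hAmax' hBmax]
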